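-- pv_equiv track=rewrite | github.com/JorgeMedranoGit/OpenGym | routes/main.py | procesar_datos_productos
-- ===== SOURCE A (Python) =====
-- def procesar_datos_productos(resultados):
--     productos = {}
--     meses = sorted(set(row[2] for row in resultados))  # Extraer meses únicos y ordenarlos
--
--     for producto, num_ventas, mes in resultados:
--         if producto not in productos:
--             productos[producto] = {mes: num_ventas}
--         else:
--             productos[producto][mes] = num_ventas
--
--     # Crear listas de ventas por mes para cada producto
--     ventas_por_producto = {
--         producto: [productos[producto].get(mes, 0) for mes in meses]
--         for producto in productos
--     }
--
--     return ventas_por_producto, meses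
-- ===== SOURCE B (Python) =====
-- def procesar_datos_productos(resultados):
--     meses = sorted(set(row[2] for row in resultados))
--     idx = {m: i for i, m in enumerate(meses)}
--     ventas_por_producto = {}
--     for producto, num_ventas, mes in resultados:
--         if producto not in ventas_por_producto:
--             ventas_por_producto[producto] = [0] * len(meses)
--         ventas_por_producto[producto][idx[mes]] = num_ventas
--     return ventas_por_producto, meses
-- ===== Notes on version B (the rewrite author's own statement) =====
-- stated objective: simpler
-- what changed: Replaces the nested per-product dict-of-months plus the second product-by-month .get comprehension pass with a precomputed month-index map and one pass that fills preallocated dense [0]*len(meses) lists in place.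
import Mathlib
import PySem

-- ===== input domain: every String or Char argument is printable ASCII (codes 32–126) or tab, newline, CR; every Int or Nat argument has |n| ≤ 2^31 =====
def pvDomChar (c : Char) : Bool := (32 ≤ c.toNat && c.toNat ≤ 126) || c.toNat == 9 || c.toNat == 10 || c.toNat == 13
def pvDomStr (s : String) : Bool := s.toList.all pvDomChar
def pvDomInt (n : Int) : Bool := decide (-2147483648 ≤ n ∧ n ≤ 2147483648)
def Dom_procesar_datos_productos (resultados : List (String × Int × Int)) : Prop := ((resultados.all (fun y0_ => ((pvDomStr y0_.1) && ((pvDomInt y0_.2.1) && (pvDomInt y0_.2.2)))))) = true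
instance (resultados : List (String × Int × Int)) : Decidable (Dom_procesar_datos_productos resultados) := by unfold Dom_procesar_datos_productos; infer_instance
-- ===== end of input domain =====

-- B replaces A's nested per-product month-dict plus the second product×month .get comprehension
-- by a precomputed month→index map and ONE pass filling preallocated dense [0]*len(meses) lists (objective: simpler).

-- meses = sorted(set(row[2] for row in resultados)) — the same source line in both programs
def pvMeses (resultados : List (String × Int × Int)) : List Int :=
  PySem.List.sorted (PySem.Set.ofList (resultados.map (fun row => row.2.2))) (fun x => x) false

-- ===== PORT A =====
-- loop body: if producto not in productos: productos[producto] = {mes: num_ventas} else: productos[producto][mes] = num_ventas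
def pvStepA (d : PySem.Dict String (PySem.Dict Int Int)) (r : String × Int × Int) :
    PySem.Dict String (PySem.Dict Int Int) :=
  if d.contains r.1 = false then d.insert r.1 (PySem.Dict.empty.insert r.2.2 r.2.1)
  else d.insert r.1 ((d.getD r.1 PySem.Dict.empty).insert r.2.2 r.2.1)

def procesar_datos_productos (resultados : List (String × Int × Int)) : (List (String × List Int)) × List Int :=
  let meses := pvMeses resultados
  let productos := resultados.foldl pvStepA PySem.Dict.empty
  -- the dict comprehension: {producto: [productos[producto].get(mes, 0) for mes in meses] for producto in productos}
  let ventas_por_producto := productos.keys.foldl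
    (fun d p => d.insert p (meses.map (fun m => (productos.getD p PySem.Dict.empty).getD m 0)))
    PySem.Dict.empty
  (ventas_por_producto.items, meses)

-- ===== PORT B =====
-- idx = {m: i for i, m in enumerate(meses)}
def pvIdx (meses : List Int) : PySem.Dict Int Int :=
  (PySem.List.enumerate meses).foldl (fun d p => d.insert p.2 p.1) PySem.Dict.empty

-- loop body: if producto not in d: d[producto] = [0]*len(meses); d[producto][idx[mes]] = num_ventas.
-- idx[mes] and the list assignment are exact here (getD / pySetD): every row's mes is in meses, so
-- Python's KeyError/IndexError cases are unreachable.
def pvStepB (meses : List Int) (d : PySem.Dict String (List Int)) (r : String × Int × Int) :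
    PySem.Dict String (List Int) :=
  let d' := if d.contains r.1 = false then d.insert r.1 (List.replicate meses.length 0) else d
  d'.insert r.1 (PySem.List.pySetD (d'.getD r.1 []) ((pvIdx meses).getD r.2.2 0) r.2.1)

def procesar_datos_productos_alt (resultados : List (String × Int × Int)) : (List (String × List Int)) × List Int :=
  let meses := pvMeses resultados
  let ventas_por_producto := resultados.foldl (pvStepB meses) PySem.Dict.empty
  (ventas_por_producto.items, meses)

-- ===== PRECONDITION & SPEC =====
def Spec_procesar_datos_productos (resultados : List (String × Int × Int)) (out : (List (String × List Int)) × List Int) : Prop := out = procesar_datos_productos_alt resultados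
instance (resultados : List (String × Int × Int)) (out : (List (String × List Int)) × List Int) : Decidable (Spec_procesar_datos_productos resultados out) := by unfold Spec_procesar_datos_productos; infer_instance

-- ===== CLAIM (what is proved, stated in full; the proofs are below) =====
def Claim_equal_procesar_datos_productos : Prop := ∀ (resultados : List (String × Int × Int)), Dom_procesar_datos_productos resultados → Spec_procesar_datos_productos resultados (procesar_datos_productos resultados)

-- ===== LEMMAS AND PROOFS =====

lemma pvMeses_nodup (resultados : List (String × Int × Int)) : (pvMeses resultados).Nodup := by
  have h := PySem.List.sorted_ofList_pairwise_lt (resultados.map (fun row => row.2.2))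
  exact h.imp (fun hlt => ne_of_lt hlt)

lemma pvMeses_mem (resultados : List (String × Int × Int)) (x : String × Int × Int)
    (hx : x ∈ resultados) : x.2.2 ∈ pvMeses resultados := by
  unfold pvMeses
  rw [PySem.List.mem_sorted]
  exact (PySem.Set.mem_ofList _ _).mpr (List.mem_map_of_mem hx)

lemma pvIdx_getD (L : List Int) (hL : L.Nodup) (j : Nat) (hj : j < L.length) :
    (pvIdx L).getD L[j] 0 = (j : Int) := by
  have hitems : (pvIdx L).items
      = PySem.Dict.empty.items ++ (PySem.List.enumerate L).map (fun p => (p.2, p.1)) := by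
    exact PySem.Dict.items_foldl_insert_fresh (PySem.List.enumerate L) (fun p => p.2) (fun p => p.1)
      PySem.Dict.empty (fun a _ => PySem.Dict.contains_empty _)
      (by rw [PySem.List.map_snd_enumerate]; exact hL)
  have hnd : (pvIdx L).keys.Nodup := by
    exact PySem.Dict.nodup_keys_foldl_insert_key (PySem.List.enumerate L) (fun p => p.2)
      (fun _ p => p.1) PySem.Dict.empty (by simp [PySem.Dict.keys_empty])
  have hjlen : j < (PySem.List.enumerate L).length := by
    rw [PySem.List.length_enumerate]; exact hj
  have hmem : (L[j], (j : Int)) ∈ (pvIdx L).items := by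
    rw [hitems]
    rw [show (PySem.Dict.empty : PySem.Dict Int Int).items = [] from rfl, List.nil_append]
    refine List.mem_map.mpr ⟨(PySem.List.enumerate L)[j], List.getElem_mem _, ?_⟩
    rw [PySem.List.getElem_enumerate]
    simp
  exact PySem.Dict.getD_of_mem_items _ hmem hnd 0

lemma pv_set_map {f : Int → Int} (L : List Int) (hL : L.Nodup) (j : Nat) (hj : j < L.length)
    (m v : Int) (hm : L[j] = m) :
    (L.map f).set j v = L.map (fun x => if x = m then v else f x) := by
  apply List.ext_getElem
  · simp
  · intro i h1 h2
    have hiL : i < L.length := by simpa using h2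
    rw [List.getElem_set, List.getElem_map]
    by_cases hij : j = i
    · subst hij
      simp [hm]
    · have hne : L[i] ≠ m := by
        rw [← hm]
        intro hcontra
        exact hij ((List.Nodup.getElem_inj_iff hL).mp hcontra).symm
      simp [hij, hne]

-- B's step, in closed form, for a row whose month is in meses
lemma pvStepB_eq (L : List Int) (hL : L.Nodup) (b : PySem.Dict String (List Int))
    (p : String) (v m : Int) (hm : m ∈ L) (inner : PySem.Dict Int Int)
    (hgetD : b.contains p = true → b.getD p [] = L.map (fun x => inner.getD x 0))
    (hinner0 : b.contains p = false → inner = PySem.Dict.empty) :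
    pvStepB L b (p, v, m) = b.insert p (L.map (fun x => (inner.insert m v).getD x 0)) := by
  obtain ⟨j, hj, hjm⟩ := List.getElem_of_mem hm
  unfold pvStepB
  simp only []
  by_cases hc : b.contains p = false
  · rw [if_pos hc, PySem.Dict.getD_insert_self, PySem.Dict.insert_insert_self]
    have hrepl : List.replicate L.length (0 : Int) = L.map (fun _ => (0 : Int)) := by simp
    rw [hrepl, ← hjm, pvIdx_getD L hL j hj, PySem.List.pySetD_natCast, hjm,
      pv_set_map L hL j hj m v hjm]
    have hmapeq : L.map (fun x => if x = m then v else (0 : Int))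
        = L.map (fun x => (inner.insert m v).getD x 0) := by
      apply List.map_congr_left
      intro x _
      rw [PySem.Dict.getD_insert, hinner0 hc]
      by_cases hxm : x = m <;> simp [hxm, PySem.Dict.getD_empty]
    rw [hmapeq]
  · have hc' : b.contains p = true := by simpa using hc
    rw [if_neg hc, hgetD hc', ← hjm, pvIdx_getD L hL j hj, PySem.List.pySetD_natCast, hjm,
      pv_set_map L hL j hj m v hjm]
    have hmapeq : L.map (fun x => if x = m then v else inner.getD x 0)
        = L.map (fun x => (inner.insert m v).getD x 0) := by
      apply List.map_congr_left
      intro x _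
      rw [PySem.Dict.getD_insert]
    rw [hmapeq]

lemma pv_keys_eq (L : List Int) (a : PySem.Dict String (PySem.Dict Int Int))
    (b : PySem.Dict String (List Int))
    (hrel : b.items = a.items.map (fun q => (q.1, L.map (fun m => q.2.getD m 0)))) :
    b.keys = a.keys := by
  show b.items.map Prod.fst = a.items.map Prod.fst
  rw [hrel, List.map_map]
  rfl

lemma pv_rel_foldl (L : List Int) (hL : L.Nodup) (r : List (String × Int × Int))
    (hmem : ∀ x ∈ r, x.2.2 ∈ L)
    (a : PySem.Dict String (PySem.Dict Int Int)) (b : PySem.Dict String (List Int))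
    (hnd : a.keys.Nodup)
    (hrel : b.items = a.items.map (fun q => (q.1, L.map (fun m => q.2.getD m 0)))) :
    (r.foldl pvStepA a).keys.Nodup ∧
    (r.foldl (pvStepB L) b).items
      = (r.foldl pvStepA a).items.map (fun q => (q.1, L.map (fun m => q.2.getD m 0))) := by
  induction r generalizing a b with
  | nil => exact ⟨hnd, hrel⟩
  | cons x r ih =>
    obtain ⟨p, v, m⟩ := x
    have hmL : m ∈ L := hmem (p, v, m) List.mem_cons_self
    have hkeys : b.keys = a.keys := pv_keys_eq L a b hrel
    have hcon : b.contains p = a.contains p := by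
      rw [PySem.Dict.contains_eq_decide_mem_keys, PySem.Dict.contains_eq_decide_mem_keys, hkeys]
    simp only [List.foldl_cons]
    by_cases hc : a.contains p = false
    -- new product
    · have hstepA : pvStepA a (p, v, m) = a.insert p (PySem.Dict.empty.insert m v) := by
        unfold pvStepA; rw [if_pos hc]
      have hstepB : pvStepB L b (p, v, m)
          = b.insert p (L.map (fun x => (PySem.Dict.empty.insert m v).getD x 0)) :=
        pvStepB_eq L hL b p v m hmL PySem.Dict.empty
          (fun ht => absurd ht (by rw [hcon, hc]; simp)) (fun _ => rfl)
      rw [hstepA, hstepB]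
      apply ih (fun y hy => hmem y (List.mem_cons_of_mem _ hy))
      · exact PySem.Dict.nodup_keys_insert a p _ hnd
      · rw [PySem.Dict.items_insert_of_not_contains a _ hc,
          PySem.Dict.items_insert_of_not_contains b _ (by rw [hcon]; exact hc),
          hrel, List.map_append]
        rfl
    -- existing product
    · have hc' : a.contains p = true := by simpa using hc
      obtain ⟨inner, hinner⟩ : ∃ inner, a.get? p = some inner := by
        have := PySem.Dict.contains_eq_isSome_get? a p
        rw [hc'] at this
        exact Option.isSome_iff_exists.mp this.symm
      have hagetD : a.getD p PySem.Dict.empty = inner :=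
        PySem.Dict.getD_of_get?_eq_some _ _ hinner
      have hbgetD : b.getD p [] = L.map (fun x => inner.getD x 0) := by
        have hmemb : (p, L.map (fun x => inner.getD x 0)) ∈ b.items := by
          rw [hrel]
          exact List.mem_map.mpr ⟨(p, inner), PySem.Dict.mem_items_of_get?_eq_some a hinner, rfl⟩
        have hbnd : b.keys.Nodup := by rw [hkeys]; exact hnd
        exact PySem.Dict.getD_of_mem_items b hmemb hbnd []
      have hstepA : pvStepA a (p, v, m) = a.insert p (inner.insert m v) := by
        unfold pvStepA; rw [if_neg (by rw [hc']; simp), hagetD]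
      have hstepB : pvStepB L b (p, v, m)
          = b.insert p (L.map (fun x => (inner.insert m v).getD x 0)) :=
        pvStepB_eq L hL b p v m hmL inner (fun _ => hbgetD)
          (fun hf => absurd hf (by rw [hcon, hc']; simp))
      rw [hstepA, hstepB]
      apply ih (fun y hy => hmem y (List.mem_cons_of_mem _ hy))
      · exact PySem.Dict.nodup_keys_insert a p _ hnd
      · rw [PySem.Dict.items_insert_of_contains a _ hc',
          PySem.Dict.items_insert_of_contains b _ (by rw [hcon]; exact hc'),
          hrel, List.map_map, List.map_map]
        apply List.map_congr_left
        intro q _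
        by_cases hqp : q.1 = p
        · simp [Function.comp, hqp]
        · simp [Function.comp, hqp]

-- ===== VERDICT (by name: the statement is the Claim_ definition above) =====
theorem procesar_datos_productos_spec : Claim_equal_procesar_datos_productos := by
  intro resultados _
  unfold Spec_procesar_datos_productos procesar_datos_productos procesar_datos_productos_alt
  simp only []
  set L := pvMeses resultados with hLdef
  have hL : L.Nodup := pvMeses_nodup resultados
  set productos := resultados.foldl pvStepA PySem.Dict.empty with hprod
  obtain ⟨hnd, hrel⟩ := pv_rel_foldl L hL resultados (fun x hx => pvMeses_mem resultados x hx)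
    PySem.Dict.empty PySem.Dict.empty (by simp [PySem.Dict.keys_empty]) (by rfl)
  have hA : (productos.keys.foldl
      (fun d p => d.insert p (L.map (fun m => (productos.getD p PySem.Dict.empty).getD m 0)))
      PySem.Dict.empty).items
      = productos.keys.map (fun p => (p, L.map (fun m => (productos.getD p PySem.Dict.empty).getD m 0))) := by
    rw [PySem.Dict.items_foldl_insert_fresh productos.keys (fun p => p)
      (fun p => L.map (fun m => (productos.getD p PySem.Dict.empty).getD m 0)) PySem.Dict.empty
      (fun a _ => PySem.Dict.contains_empty _) (by simpa using hnd)]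
    rfl
  refine Prod.ext ?_ rfl
  show (productos.keys.foldl _ PySem.Dict.empty).items
      = (resultados.foldl (pvStepB L) PySem.Dict.empty).items
  rw [hA, hrel, ← hprod, PySem.Dict.items_eq_map_keys productos hnd PySem.Dict.empty, List.map_map]
  rfl
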